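-- pv_equiv track=rewrite | github.com/MacNaughty/Puzzles | Python3/Algorithms/Sorting/Insertion Sort Advanced Analysis (dict, incomplete).py | collect_numbers_and_indices
-- ===== SOURCE A (Python) =====
-- from collections import OrderedDict
--
-- def collect_numbers_and_indices(full_list):
--
--     # consecutive_and_first_occurrences is of the form: {number : last_consecutive_index}
--     consecutive_and_first_occurrences = OrderedDict()
--     consecutive_and_first_occurrences[full_list[0]] = 0
--     last_element = full_list[0]
--
--     for i in range(1, len(full_list)):
--
--         # if the number, lst[i], is not already a key in the dictionary,
--         #   add the number as the key, and the last occurring index in a row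
--         #   (we ignore the first set of consecutive elements to increase efficiency)
--         #   for a large set of unique numbers, this might actually be slower
--         if not full_list[i] in consecutive_and_first_occurrences.keys():
--             consecutive_and_first_occurrences[full_list[i]] = i
--             last_element = full_list[i]
--
--         # if the lst[i] is already a key in the dictionary and is now occurring consecutively,
--         #   increment its index (value) by 1
--         #   otherwise ignore it
--         elif full_list[i] == last_element:
--             consecutive_and_first_occurrences[full_list[i]] += 1
--
--     return consecutive_and_first_occurrences
-- ===== SOURCE B (Python) =====
-- from collections import OrderedDict
--
--
-- def collect_numbers_and_indices(full_list):
--     # Two-phase rewrite: first record each distinct value's first index, then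
--     # for each value add the number of its repeats seen before the next new
--     # value first appears (which is exactly when A stops incrementing it).
--     n = len(full_list)
--     first_seen = OrderedDict()
--     for i, x in enumerate(full_list):
--         if x not in first_seen:
--             first_seen[x] = i
--     items = list(first_seen.items())
--     nexts = [p for _, p in items[1:]] + [n]
--     result = OrderedDict()
--     for (v, p), q in zip(items, nexts):
--         result[v] = p + full_list[p + 1:q].count(v)
--     return result
-- ===== Notes on version B (the rewrite author's own statement) =====
-- stated objective: alternative
-- what changed: Replaced A's single stateful pass (ordered dict plus a last_element flag deciding increments) by a two-phase computation: first collect each distinct value's first index, then for each value count its occurrences in the slice up to the next new value's first index and add them to the first index.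
import Mathlib
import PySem

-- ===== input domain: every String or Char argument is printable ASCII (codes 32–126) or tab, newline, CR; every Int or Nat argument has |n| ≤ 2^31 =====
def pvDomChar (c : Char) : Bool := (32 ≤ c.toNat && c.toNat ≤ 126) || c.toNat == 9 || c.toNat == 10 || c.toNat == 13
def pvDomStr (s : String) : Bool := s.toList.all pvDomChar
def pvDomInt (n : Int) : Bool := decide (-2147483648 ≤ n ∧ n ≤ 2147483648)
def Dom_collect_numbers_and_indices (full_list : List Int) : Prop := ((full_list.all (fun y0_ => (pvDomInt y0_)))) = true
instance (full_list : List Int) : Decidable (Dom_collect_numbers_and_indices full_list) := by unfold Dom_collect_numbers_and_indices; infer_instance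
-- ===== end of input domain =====

-- B is an alternative two-phase decomposition (first-occurrence table, then per-value
-- counting in a slice) of A's one-pass stateful loop; same cost, no speed claim.

-- ===== PORT A =====
-- the loop over range(1, len): state is (dict, last_element); i is the current index
def pvAuxA : List Int → Int → PySem.Dict Int Int → Int → PySem.Dict Int Int
  | [], _, d, _ => d
  | y :: ys, i, d, l =>
    if d.contains y = false then pvAuxA ys (i + 1) (d.insert y i) y
    else if y = l then pvAuxA ys (i + 1) (d.modify y 0 (· + 1)) l
    else pvAuxA ys (i + 1) d l

def collect_numbers_and_indices (full_list : List Int) : List (Int × Int) :=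
  match full_list with
  | [] => []   -- Python raises IndexError here indexing the first element (outside Pre_)
  | x :: rest => (pvAuxA rest 1 (PySem.Dict.empty.insert x 0) x).items

-- ===== PORT B =====
-- phase 1: first_seen[x] = i for the first occurrence of each x
def pvFirstSeen : List Int → Int → PySem.Dict Int Int → PySem.Dict Int Int
  | [], _, d => d
  | x :: ys, i, d => pvFirstSeen ys (i + 1) (if d.contains x then d else d.insert x i)

-- phase 2: for ((v, p), q) in zip(items, nexts): result[v] = p + full_list[p+1:q].count(v)
def pvPhase2 : List ((Int × Int) × Int) → List Int → PySem.Dict Int Int → PySem.Dict Int Int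
  | [], _, r => r
  | ((v, p), q) :: ts, xs, r =>
      pvPhase2 ts xs (r.insert v (p + ((PySem.List.slice xs (some (p + 1)) (some q)).count v)))

def collect_numbers_and_indices_alt (full_list : List Int) : List (Int × Int) :=
  let n : Int := full_list.length
  let items := (pvFirstSeen full_list 0 PySem.Dict.empty).items
  let nexts := (items.drop 1).map Prod.snd ++ [n]
  (pvPhase2 (items.zip nexts) full_list PySem.Dict.empty).items

-- ===== PRECONDITION & SPEC =====
-- A unconditionally indexes the first element, so it raises IndexError on the empty list.
def Pre_collect_numbers_and_indices (full_list : List Int) : Prop := full_list ≠ []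
instance (full_list : List Int) : Decidable (Pre_collect_numbers_and_indices full_list) := by
  unfold Pre_collect_numbers_and_indices; infer_instance

def pvWitness_collect_numbers_and_indices : List Int := [1, 2, 2, -3, 2]

def Spec_collect_numbers_and_indices (full_list : List Int) (out : List (Int × Int)) : Prop :=
  out = collect_numbers_and_indices_alt full_list
instance (full_list : List Int) (out : List (Int × Int)) :
    Decidable (Spec_collect_numbers_and_indices full_list out) := by
  unfold Spec_collect_numbers_and_indices; infer_instance

-- ===== CLAIM (what is proved, stated in full; the proofs are below) =====
def Claim_equal_collect_numbers_and_indices : Prop :=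
  ∀ (full_list : List Int), Dom_collect_numbers_and_indices full_list →
    Pre_collect_numbers_and_indices full_list →
    Spec_collect_numbers_and_indices full_list (collect_numbers_and_indices full_list)

-- ===== LEMMAS AND PROOFS =====

-- proof-side view of A's loop keeping the full state (dict, last_element)
def pvStep (y j : Int) : PySem.Dict Int Int × Int → PySem.Dict Int Int × Int :=
  fun s =>
    if s.1.contains y = false then (s.1.insert y j, y)
    else if y = s.2 then (s.1.modify y 0 (· + 1), s.2)
    else s

def pvStateA : List Int → Int → PySem.Dict Int Int × Int → PySem.Dict Int Int × Int
  | [], _, s => s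
  | y :: ys, i, s => pvStateA ys (i + 1) (pvStep y i s)

-- proof-side pairing of first-seen items with the next first-occurrence index
def pvPairs : List (Int × Int) → Int → List ((Int × Int) × Int)
  | [], _ => []
  | [e], fin => [(e, fin)]
  | e :: e' :: ts, fin => (e, e'.2) :: pvPairs (e' :: ts) fin

theorem pvAuxA_eq_stateA : ∀ (ys : List Int) (i : Int) (d : PySem.Dict Int Int) (l : Int),
    pvAuxA ys i d l = (pvStateA ys i (d, l)).1 := by
  intro ys
  induction ys with
  | nil => intro i d l; rfl
  | cons y ys ih =>
    intro i d l
    simp only [pvAuxA, pvStateA, pvStep]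
    by_cases h1 : d.contains y = false
    · simp [h1, ih]
    · by_cases h2 : y = l <;> simp [h1, h2, ih] <;> (try split) <;> simp_all

theorem pvStateA_append : ∀ (ys : List Int) (y : Int) (i : Int) (s : PySem.Dict Int Int × Int),
    pvStateA (ys ++ [y]) i s = pvStep y (i + ys.length) (pvStateA ys i s) := by
  intro ys
  induction ys with
  | nil => intro y i s; simp [pvStateA]
  | cons z ys ih =>
    intro y i s
    simp only [List.cons_append, pvStateA, ih]
    congr 1
    push_cast [List.length_cons]
    ring

theorem pvFirstSeen_append : ∀ (ys : List Int) (y : Int) (i : Int) (d : PySem.Dict Int Int),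
    pvFirstSeen (ys ++ [y]) i d =
      (if (pvFirstSeen ys i d).contains y then pvFirstSeen ys i d
       else (pvFirstSeen ys i d).insert y (i + ys.length)) := by
  intro ys
  induction ys with
  | nil => intro y i d; simp [pvFirstSeen]
  | cons z ys ih =>
    intro y i d
    simp only [List.cons_append, pvFirstSeen, ih]
    congr 2
    push_cast [List.length_cons]
    ring

theorem pvZip_eq_pvPairs : ∀ (items : List (Int × Int)) (fin : Int),
    items.zip ((items.drop 1).map Prod.snd ++ [fin]) = pvPairs items fin := by
  intro items
  induction items with
  | nil => intro fin; rfl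
  | cons e ts ih =>
    intro fin
    cases ts with
    | nil => rfl
    | cons e' ts' =>
      have h := ih fin
      simp only [pvPairs, List.drop_one, List.tail_cons, List.map_cons,
        List.cons_append, List.zip_cons_cons] at h ⊢
      rw [h]

theorem pvPairs_append : ∀ (items : List (Int × Int)) (e : Int × Int) (fin : Int),
    pvPairs (items ++ [e]) fin = pvPairs items e.2 ++ [(e, fin)] := by
  intro items
  induction items with
  | nil => intro e fin; rfl
  | cons a ts ih =>
    intro e fin
    cases ts with
    | nil => rfl
    | cons a' ts' =>
      simp only [List.cons_append, pvPairs] at *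
      rw [ih]

theorem pvMem_pvPairs : ∀ (l : List (Int × Int)) (fin : Int) (t : (Int × Int) × Int),
    t ∈ pvPairs l fin → t.1 ∈ l ∧ (t.2 = fin ∨ ∃ e ∈ l, t.2 = e.2) := by
  intro l
  induction l with
  | nil => intro fin t h; simp [pvPairs] at h
  | cons e ts ih =>
    intro fin t h
    cases ts with
    | nil =>
      simp [pvPairs] at h
      subst h; simp
    | cons e' ts' =>
      simp only [pvPairs, List.mem_cons] at h
      rcases h with h | h
      · subst h
        refine ⟨by simp, Or.inr ⟨e', by simp, rfl⟩⟩
      · rcases ih fin t h with ⟨h1, h2⟩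
        refine ⟨by simp only [List.mem_cons] at h1 ⊢; tauto, ?_⟩
        rcases h2 with h2 | ⟨a, ha, hb⟩
        · exact Or.inl h2
        · refine Or.inr ⟨a, ?_, hb⟩
          simp only [List.mem_cons] at ha ⊢; tauto

theorem pvPhase2_append : ∀ (ts : List ((Int × Int) × Int)) (v p q : Int)
    (xs : List Int) (r : PySem.Dict Int Int),
    pvPhase2 (ts ++ [((v, p), q)]) xs r =
      (pvPhase2 ts xs r).insert v (p + ((PySem.List.slice xs (some (p + 1)) (some q)).count v)) := by
  intro ts
  induction ts with
  | nil => intro v p q xs r; rfl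
  | cons t ts ih =>
    intro v p q xs r
    obtain ⟨⟨v', p'⟩, q'⟩ := t
    simp only [List.cons_append, pvPhase2, ih]

theorem pvPhase2_congr : ∀ (ts : List ((Int × Int) × Int)) (xs xs' : List Int)
    (r : PySem.Dict Int Int),
    (∀ t ∈ ts, PySem.List.slice xs' (some (t.1.2 + 1)) (some t.2)
             = PySem.List.slice xs (some (t.1.2 + 1)) (some t.2)) →
    pvPhase2 ts xs' r = pvPhase2 ts xs r := by
  intro ts
  induction ts with
  | nil => intro xs xs' r h; rfl
  | cons t ts ih =>
    intro xs xs' r h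
    obtain ⟨⟨v, p⟩, q⟩ := t
    simp only [pvPhase2]
    rw [h ⟨⟨v, p⟩, q⟩ (by simp)]
    exact ih xs xs' _ (fun t ht => h t (by simp [ht]))

theorem pvSlice_append_frozen (xs : List Int) (y : Int) (a b : Int)
    (h0 : 0 ≤ a) (hb : 0 ≤ b) (hbn : b.toNat ≤ xs.length) :
    PySem.List.slice (xs ++ [y]) (some a) (some b) = PySem.List.slice xs (some a) (some b) := by
  rw [PySem.List.slice_toNat _ h0 hb, PySem.List.slice_toNat _ h0 hb]
  rcases Nat.le_total a.toNat xs.length with h | h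
  · rw [List.drop_append_of_le_length h,
        List.take_append_of_le_length (by simp only [List.length_drop]; omega)]
  · have hz : b.toNat - a.toNat = 0 := by omega
    simp [hz]

theorem pvSlice_append_last (xs : List Int) (y : Int) (a : Int)
    (h0 : 0 ≤ a) (han : a.toNat ≤ xs.length) :
    PySem.List.slice (xs ++ [y]) (some a) (some ((xs.length : Int) + 1))
      = PySem.List.slice xs (some a) (some (xs.length : Int)) ++ [y] := by
  rw [PySem.List.slice_toNat _ h0 (by positivity),
      PySem.List.slice_toNat _ h0 (by positivity)]
  rw [List.drop_append_of_le_length han]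
  have h1 : ((xs.length : Int) + 1).toNat = xs.length + 1 := by omega
  have h2 : ((xs.length : Int)).toNat = xs.length := by omega
  rw [h1, h2]
  rw [List.take_of_length_le (by simp only [List.length_append, List.length_drop,
        List.length_cons, List.length_nil]; omega),
      List.take_of_length_le (by simp only [List.length_drop]; omega)]

theorem pvModify_insert (d : PySem.Dict Int Int) (k v : Int) (f : Int → Int) :
    (d.insert k v).modify k 0 f = d.insert k (f v) := by
  unfold PySem.Dict.modify
  simp [PySem.Dict.getD_insert_self, PySem.Dict.insert_insert_self]

-- one right-extension step preserves the invariant linking A's state to B's phases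
theorem pvStepInv (xs : List Int) (y : Int) (F : PySem.Dict Int Int)
    (S : PySem.Dict Int Int × Int)
    (h1 : F.keys.Nodup) (h2 : F.items ≠ [])
    (h3 : ∀ v, F.contains v = S.1.contains v)
    (h4 : ∃ e, F.items.getLast? = some e ∧ e.1 = S.2)
    (h5 : ∀ e ∈ F.items, 0 ≤ e.2 ∧ e.2 < (xs.length : Int))
    (h6 : S.1 = pvPhase2 (pvPairs F.items (xs.length : Int)) xs PySem.Dict.empty) :
    ((if F.contains y = true then F else F.insert y (xs.length : Int)).keys.Nodup) ∧
    ((if F.contains y = true then F else F.insert y (xs.length : Int)).items ≠ []) ∧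
    (∀ v, (if F.contains y = true then F else F.insert y (xs.length : Int)).contains v
        = (pvStep y (xs.length : Int) S).1.contains v) ∧
    (∃ e, (if F.contains y = true then F else F.insert y (xs.length : Int)).items.getLast?
            = some e ∧ e.1 = (pvStep y (xs.length : Int) S).2) ∧
    (∀ e ∈ (if F.contains y = true then F else F.insert y (xs.length : Int)).items,
        0 ≤ e.2 ∧ e.2 < ((xs ++ [y]).length : Int)) ∧
    ((pvStep y (xs.length : Int) S).1
      = pvPhase2 (pvPairs (if F.contains y = true then F
                           else F.insert y (xs.length : Int)).items ((xs ++ [y]).length : Int))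
                 (xs ++ [y]) PySem.Dict.empty) := by
  have hlen : (((xs ++ [y]).length : Int)) = (xs.length : Int) + 1 := by
    simp only [List.length_append, List.length_cons, List.length_nil]
    push_cast; ring
  by_cases hc : F.contains y = true
  · -- y already seen: F unchanged
    simp only [hc, if_pos rfl, if_true]
    have hSc : S.1.contains y = true := by rw [← h3]; exact hc
    obtain ⟨e, he, he1⟩ := h4
    obtain ⟨init, hinit⟩ := List.getLast?_eq_some_iff.mp he
    -- bounds for every pair in the shared prefix
    have hmemitems : ∀ t ∈ pvPairs init e.2, t.1 ∈ F.items ∧ (t.2 = e.2 ∨ ∃ a ∈ init, t.2 = a.2) := by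
      intro t ht
      obtain ⟨ht1, ht2⟩ := pvMem_pvPairs init e.2 t ht
      exact ⟨by rw [hinit]; exact List.mem_append_left _ ht1, ht2⟩
    have hbound : ∀ t ∈ pvPairs init e.2,
        0 ≤ t.1.2 ∧ t.1.2 < (xs.length : Int) ∧ 0 ≤ t.2 ∧ t.2 ≤ (xs.length : Int) := by
      intro t ht
      obtain ⟨ht1, ht2⟩ := hmemitems t ht
      obtain ⟨hb1, hb2⟩ := h5 t.1 ht1
      have hee : e ∈ F.items := by rw [hinit]; exact List.mem_append_right _ (by simp)
      obtain ⟨hb3, hb4⟩ := h5 e hee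
      rcases ht2 with h | ⟨a, ha, hb⟩
      · exact ⟨hb1, hb2, by omega, by omega⟩
      · have haF : a ∈ F.items := by rw [hinit]; exact List.mem_append_left _ ha
        obtain ⟨hb5, hb6⟩ := h5 a haF
        exact ⟨hb1, hb2, by omega, by omega⟩
    have hcongr : pvPhase2 (pvPairs init e.2) (xs ++ [y]) PySem.Dict.empty
                = pvPhase2 (pvPairs init e.2) xs PySem.Dict.empty := by
      apply pvPhase2_congr
      intro t ht
      obtain ⟨hb1, hb2, hb3, hb4⟩ := hbound t ht
      exact pvSlice_append_frozen xs y _ _ (by omega) hb3 (by omega)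
    have hee : e ∈ F.items := by rw [hinit]; exact List.mem_append_right _ (by simp)
    obtain ⟨hb3, hb4⟩ := h5 e hee
    have hsl : PySem.List.slice (xs ++ [y]) (some (e.2 + 1)) (some ((xs.length : Int) + 1))
             = PySem.List.slice xs (some (e.2 + 1)) (some (xs.length : Int)) ++ [y] :=
      pvSlice_append_last xs y (e.2 + 1) (by omega) (by omega)
    have h6' : S.1 = (pvPhase2 (pvPairs init e.2) xs PySem.Dict.empty).insert e.1
        (e.2 + ((PySem.List.slice xs (some (e.2 + 1)) (some (xs.length : Int))).count e.1)) := by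
      rw [h6, hinit, pvPairs_append, pvPhase2_append]
    have hnewpairs : pvPairs F.items ((xs ++ [y]).length : Int)
        = pvPairs init e.2 ++ [(e, (xs.length : Int) + 1)] := by
      rw [hinit, pvPairs_append, hlen]
    rw [hnewpairs, pvPhase2_append, hcongr, hlen, hsl]
    refine ⟨h1, h2, ?_, ⟨e, he, ?_⟩, ?_, ?_⟩
    · intro v
      simp only [pvStep, hSc, Bool.true_eq_false, if_false]
      split
      · simp only [PySem.Dict.contains_modify]
        by_cases hv : v = y
        · subst hv; simp [hc]
        · simp [hv, h3 v]
      · exact h3 v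
    · simp only [pvStep, hSc, Bool.true_eq_false, if_false]
      split <;> simp [he1]
    · intro a ha
      obtain ⟨hb1, hb2⟩ := h5 a ha
      exact ⟨hb1, by omega⟩
    · simp only [pvStep, hSc, Bool.true_eq_false, if_false]
      by_cases hy : y = S.2
      · simp only [if_pos hy]
        rw [h6', hy, ← he1, pvModify_insert]
        congr 1
        rw [List.count_append, List.count_singleton, he1, ← hy]
        simp
        ring
      · simp only [if_neg hy]
        rw [h6']
        congr 1
        rw [List.count_append, List.count_singleton]
        have : (y == e.1) = false := by
          simp only [beq_eq_false_iff_ne, ne_eq]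
          rw [he1]; exact fun h => hy (by rw [h])
        rw [this]
        simp
  · -- y is new: F gains (y, n), A inserts (y, n) and last becomes y
    have hc' : F.contains y = false := by simpa using hc
    have hSc : S.1.contains y = false := by rw [← h3]; exact hc'
    have hitems : (F.insert y (xs.length : Int)).items = F.items ++ [(y, (xs.length : Int))] :=
      PySem.Dict.items_insert_of_not_contains F _ hc'
    simp only [hc', if_false, Bool.false_eq_true]
    refine ⟨PySem.Dict.nodup_keys_insert F _ _ h1, by simp [hitems], ?_, ?_, ?_, ?_⟩
    · intro v
      simp only [pvStep, hSc, eq_self_iff_true, if_true]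
      rw [PySem.Dict.contains_insert, PySem.Dict.contains_insert, h3]
    · refine ⟨(y, (xs.length : Int)), ?_, ?_⟩
      · rw [hitems]; simp
      · simp [pvStep, hSc]
    · intro a ha
      rw [hitems] at ha
      rcases List.mem_append.mp ha with h | h
      · obtain ⟨hb1, hb2⟩ := h5 a h
        exact ⟨hb1, by omega⟩
      · simp at h
        subst h
        constructor <;> [positivity; omega]
    · simp only [pvStep, hSc, Bool.false_eq_true, if_true]
      rw [hitems, hlen, pvPairs_append, pvPhase2_append]
      have hcongr : pvPhase2 (pvPairs F.items (xs.length : Int)) (xs ++ [y]) PySem.Dict.empty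
                  = pvPhase2 (pvPairs F.items (xs.length : Int)) xs PySem.Dict.empty := by
        apply pvPhase2_congr
        intro t ht
        obtain ⟨ht1, ht2⟩ := pvMem_pvPairs F.items (xs.length : Int) t ht
        obtain ⟨hb1, hb2⟩ := h5 t.1 ht1
        have hq : 0 ≤ t.2 ∧ t.2 ≤ (xs.length : Int) := by
          rcases ht2 with h | ⟨a, ha, hb⟩
          · constructor <;> simp [h]
          · obtain ⟨hb3, hb4⟩ := h5 a ha
            rw [hb]; exact ⟨hb3, by omega⟩
        exact pvSlice_append_frozen xs y _ _ (by omega) hq.1 (by omega)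
      rw [hcongr, ← h6]
      have hsl : PySem.List.slice (xs ++ [y]) (some ((xs.length : Int) + 1))
                   (some ((xs.length : Int) + 1)) = [] := by
        rw [PySem.List.slice_toNat _ (by positivity) (by positivity)]
        simp
      rw [hsl]
      simp

-- the grand invariant, by induction on the list extended on the right
theorem pvMain : ∀ (rest : List Int) (x : Int),
    ((pvFirstSeen (x :: rest) 0 PySem.Dict.empty).keys.Nodup) ∧
    ((pvFirstSeen (x :: rest) 0 PySem.Dict.empty).items ≠ []) ∧
    (∀ v, (pvFirstSeen (x :: rest) 0 PySem.Dict.empty).contains v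
        = (pvStateA rest 1 (PySem.Dict.empty.insert x 0, x)).1.contains v) ∧
    (∃ e, (pvFirstSeen (x :: rest) 0 PySem.Dict.empty).items.getLast? = some e ∧
          e.1 = (pvStateA rest 1 (PySem.Dict.empty.insert x 0, x)).2) ∧
    (∀ e ∈ (pvFirstSeen (x :: rest) 0 PySem.Dict.empty).items,
        0 ≤ e.2 ∧ e.2 < ((x :: rest).length : Int)) ∧
    ((pvStateA rest 1 (PySem.Dict.empty.insert x 0, x)).1
      = pvPhase2 (pvPairs (pvFirstSeen (x :: rest) 0 PySem.Dict.empty).items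
                          ((x :: rest).length : Int))
                 (x :: rest) PySem.Dict.empty) := by
  intro rest x
  induction rest using List.reverseRecOn with
  | nil =>
    have hF : pvFirstSeen [x] 0 PySem.Dict.empty = PySem.Dict.empty.insert x 0 := by
      simp [pvFirstSeen, PySem.Dict.contains_empty]
    have hitems : ((PySem.Dict.empty : PySem.Dict Int Int).insert x (0 : Int)).items
        = [(x, (0 : Int))] := rfl
    have hsl : PySem.List.slice [x] (some ((0 : Int) + 1)) (some (1 : Int)) = ([] : List Int) := by
      rw [show ((0 : Int) + 1) = (1 : Int) by ring]
      rw [PySem.List.slice_toNat _ (by norm_num) (by norm_num)]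
      simp
    refine ⟨?_, ?_, ?_, ?_, ?_, ?_⟩
    · rw [hF]; exact PySem.Dict.nodup_keys_insert _ _ _ PySem.Dict.nodup_keys_empty
    · rw [hF, hitems]; simp
    · intro v; rw [hF]; rfl
    · exact ⟨(x, 0), by rw [hF, hitems]; rfl, rfl⟩
    · intro e he
      rw [hF, hitems] at he
      simp at he
      subst he
      simp
    · rw [hF]
      show PySem.Dict.empty.insert x 0 = _
      rw [hitems]
      show _ = pvPhase2 [((x, 0), ((1:Nat) : Int))] [x] PySem.Dict.empty
      simp only [pvPhase2, Nat.cast_one]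
      rw [hsl]
      simp
  | append_singleton ys y ih =>
    obtain ⟨h1, h2, h3, h4, h5, h6⟩ := ih
    have key := pvStepInv (x :: ys) y (pvFirstSeen (x :: ys) 0 PySem.Dict.empty)
      (pvStateA ys 1 (PySem.Dict.empty.insert x 0, x)) h1 h2 h3 h4 h5 h6
    have hidx : (1 : Int) + (ys.length : Int) = (((x :: ys).length) : Int) := by
      simp only [List.length_cons]; push_cast; ring
    rw [← List.cons_append, pvFirstSeen_append, pvStateA_append, hidx]
    simpa only [zero_add] using key

-- ===== VERDICT (by name: the statement is the Claim_ definition above) =====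
theorem collect_numbers_and_indices_spec : Claim_equal_collect_numbers_and_indices := by
  unfold Claim_equal_collect_numbers_and_indices
  intro full_list _ hpre
  unfold Spec_collect_numbers_and_indices
  match full_list with
  | [] => exact absurd rfl hpre
  | x :: rest =>
    obtain ⟨-, -, -, -, -, h6⟩ := pvMain rest x
    unfold collect_numbers_and_indices collect_numbers_and_indices_alt
    simp only [pvZip_eq_pvPairs]
    rw [pvAuxA_eq_stateA, h6]
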